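-- pv_equiv track=rewrite | github.com/moore3930/test_time_mt_vllm | plots/plot-scaling-summary.py | collect_settings_by_base_lang
-- ===== SOURCE A (Python) =====
-- from typing import Dict, List
--
-- TARGET_LANGS = ["en-ru", "en-nl", "en-zh"]
--
-- def base_lang(section_name: str) -> str:
--     parts = section_name.split("-")
--     if len(parts) < 2:
--         return section_name
--     return f"{parts[0]}-{parts[1]}"
--
-- def collect_settings_by_base_lang(
--     data: Dict[str, List[Dict[str, str]]]
-- ) -> Dict[str, Dict[str, List[Dict[str, str]]]]:
--     grouped: Dict[str, Dict[str, List[Dict[str, str]]]] = {lang: {} for lang in TARGET_LANGS}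
--     for section_name, rows in data.items():
--         lang = base_lang(section_name)
--         if lang in grouped:
--             grouped[lang][section_name] = rows
--     return grouped
-- ===== SOURCE B (Python) =====
-- TARGET_LANGS = ["en-ru", "en-nl", "en-zh"]
--
-- def base_lang(section_name: str) -> str:
--     parts = section_name.split("-")
--     if len(parts) < 2:
--         return section_name
--     return f"{parts[0]}-{parts[1]}"
--
-- def collect_settings_by_base_lang(data):
--     # staged decomposition: first tag every section with its base language in one
--     # pass, then build each target language's group from the tagged list
--     tagged = [(base_lang(s), s, rows) for s, rows in data.items()]
--     return {lang: {s: rows for l, s, rows in tagged if l == lang}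
--             for lang in TARGET_LANGS}
-- ===== Notes on version B (the rewrite author's own statement) =====
-- stated objective: alternative
-- what changed: Replaces A's single bucketing pass into pre-built empty buckets by a staged scheme: one tagging pass that pairs each section with its base language, then, per target language, one filtered dict-build over the tagged list.
import Mathlib
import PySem

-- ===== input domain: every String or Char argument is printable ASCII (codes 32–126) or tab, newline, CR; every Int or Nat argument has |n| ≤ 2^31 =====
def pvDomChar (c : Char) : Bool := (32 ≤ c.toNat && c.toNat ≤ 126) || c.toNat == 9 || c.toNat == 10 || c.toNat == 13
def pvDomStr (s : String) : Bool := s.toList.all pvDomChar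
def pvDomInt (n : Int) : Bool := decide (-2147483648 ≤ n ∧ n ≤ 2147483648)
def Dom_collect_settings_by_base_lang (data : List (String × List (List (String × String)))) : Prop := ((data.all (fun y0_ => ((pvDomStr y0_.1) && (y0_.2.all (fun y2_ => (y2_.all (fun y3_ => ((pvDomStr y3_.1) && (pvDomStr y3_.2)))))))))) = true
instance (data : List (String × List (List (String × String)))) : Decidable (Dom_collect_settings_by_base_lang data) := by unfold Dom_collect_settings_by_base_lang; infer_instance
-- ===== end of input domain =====

-- B is a staged re-decomposition: one tagging pass pairing every section with its base
-- language, then one filtered dict-build per target language over the tagged list.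

-- shared module-level helper base_lang (used, as in the Python module, by both versions)
def baseLang (section_name : String) : String :=
  let parts := (PySem.Str.split? section_name "-").getD []   -- sep = "-" ≠ "", so getD is never used
  if parts.length < 2 then section_name
  else ((PySem.List.pyGet? parts 0).getD "") ++ "-" ++ ((PySem.List.pyGet? parts 1).getD "")

def targetLangs : List String := ["en-ru", "en-nl", "en-zh"]

-- ===== PORT A =====
-- the body of A's for-loop over data.items()
def stepA (g : PySem.Dict String (PySem.Dict String (List (List (String × String)))))
    (p : String × List (List (String × String))) :
    PySem.Dict String (PySem.Dict String (List (List (String × String)))) :=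
  let lang := baseLang p.1
  if g.contains lang then g.modify lang PySem.Dict.empty (fun d => d.insert p.1 p.2) else g

def collect_settings_by_base_lang (data : List (String × List (List (String × String)))) : List (String × List (String × List (List (String × String)))) :=
  let grouped : PySem.Dict String (PySem.Dict String (List (List (String × String)))) :=
    targetLangs.foldl (fun g lang => g.insert lang PySem.Dict.empty) PySem.Dict.empty
  let grouped := data.foldl stepA grouped
  grouped.items.map (fun q => (q.1, q.2.items))

-- ===== PORT B =====
abbrev PVRows := List (List (String × String))

-- first stage: tag each (section, rows) with its base language
def pvTag (data : List (String × PVRows)) : List (String × String × PVRows) :=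
  data.map (fun p => (baseLang p.1, p.1, p.2))

-- second stage, inner dict comprehension: keep the tagged entries of one language
def pvGather (lang : String) :
    List (String × String × PVRows) → PySem.Dict String PVRows → PySem.Dict String PVRows
  | [], d => d
  | (l, s, rows) :: rest, d =>
      pvGather lang rest (if l == lang then d.insert s rows else d)

-- second stage, outer dict comprehension over TARGET_LANGS
def pvGroups (tagged : List (String × String × PVRows)) :
    List String → List (String × List (String × PVRows))
  | [] => []
  | lang :: more => (lang, (pvGather lang tagged PySem.Dict.empty).items) :: pvGroups tagged more

def collect_settings_by_base_lang_alt (data : List (String × List (List (String × String)))) : List (String × List (String × List (List (String × String)))) :=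
  pvGroups (pvTag data) targetLangs

-- ===== PRECONDITION & SPEC =====
def Spec_collect_settings_by_base_lang (data : List (String × List (List (String × String)))) (out : List (String × List (String × List (List (String × String))))) : Prop := out = collect_settings_by_base_lang_alt data
-- DecidableEq of the output type, assembled by hand (nesting is one level past what infer_instance reaches)
def pvDecEqInner : DecidableEq (String × List (String × List (List (String × String)))) :=
  @instDecidableEqProd _ _ _ (by infer_instance)
def pvDecEqOut : DecidableEq (List (String × List (String × List (List (String × String))))) :=
  @instDecidableEqList _ pvDecEqInner
instance (data : List (String × List (List (String × String)))) (out : List (String × List (String × List (List (String × String))))) : Decidable (Spec_collect_settings_by_base_lang data out) := by unfold Spec_collect_settings_by_base_lang; exact pvDecEqOut out (collect_settings_by_base_lang_alt data)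

-- ===== CLAIM (what is proved, stated in full; the proofs are below) =====
def Claim_equal_collect_settings_by_base_lang : Prop := ∀ (data : List (String × List (List (String × String)))), Dom_collect_settings_by_base_lang data → Spec_collect_settings_by_base_lang data (collect_settings_by_base_lang data)

-- ===== LEMMAS AND PROOFS =====

-- one step of B's per-language gather, as an explicit function (proof-local shorthand)
def pvStep (lang : String) (d : PySem.Dict String PVRows) (p : String × PVRows) :
    PySem.Dict String PVRows :=
  if baseLang p.1 == lang then d.insert p.1 p.2 else d

lemma pvGather_tag_cons (lang : String) (p : String × PVRows)
    (rest : List (String × PVRows)) (d : PySem.Dict String PVRows) :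
    pvGather lang (pvTag (p :: rest)) d = pvGather lang (pvTag rest) (pvStep lang d p) := rfl

-- one step of A's loop on the three-bucket dict = one step of each per-language gather
lemma stepA_eq (p : String × List (List (String × String)))
    (d1 d2 d3 : PySem.Dict String PVRows) :
    stepA (PySem.Dict.mk [("en-ru", d1), ("en-nl", d2), ("en-zh", d3)]) p
    = PySem.Dict.mk [("en-ru", pvStep "en-ru" d1 p), ("en-nl", pvStep "en-nl" d2 p), ("en-zh", pvStep "en-zh" d3 p)] := by
  by_cases h1 : baseLang p.1 = "en-ru"
  · simp [stepA, pvStep, h1, PySem.Dict.contains, PySem.Dict.modify, PySem.Dict.getD, PySem.Dict.get?, PySem.Dict.insert]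
    rw [h1]; rfl
  · by_cases h2 : baseLang p.1 = "en-nl"
    · simp [stepA, pvStep, h2, PySem.Dict.contains, PySem.Dict.modify, PySem.Dict.getD, PySem.Dict.get?, PySem.Dict.insert]
      rw [h2]; rfl
    · by_cases h3 : baseLang p.1 = "en-zh"
      · simp [stepA, pvStep, h3, PySem.Dict.contains, PySem.Dict.modify, PySem.Dict.getD, PySem.Dict.get?, PySem.Dict.insert]
        rw [h3]; rfl
      · simp [stepA, pvStep, h1, h2, h3, PySem.Dict.contains]
        rintro (h | h | h)
        · exact absurd h.symm h1
        · exact absurd h.symm h2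
        · exact absurd h.symm h3

-- A's fold over data, started on the three-bucket dict, keeps the three keys in place and
-- performs exactly B's per-language gather over the tagged list inside each bucket.
lemma fold_inv (data : List (String × List (List (String × String))))
    (d1 d2 d3 : PySem.Dict String PVRows) :
    data.foldl stepA (PySem.Dict.mk [("en-ru", d1), ("en-nl", d2), ("en-zh", d3)])
    = PySem.Dict.mk [("en-ru", pvGather "en-ru" (pvTag data) d1),
                     ("en-nl", pvGather "en-nl" (pvTag data) d2),
                     ("en-zh", pvGather "en-zh" (pvTag data) d3)] := by
  induction data generalizing d1 d2 d3 with
  | nil => rfl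
  | cons p rest ih =>
    rw [List.foldl_cons, stepA_eq, ih, pvGather_tag_cons, pvGather_tag_cons, pvGather_tag_cons]

-- ===== VERDICT (by name: the statement is the Claim_ definition above) =====
theorem collect_settings_by_base_lang_spec : Claim_equal_collect_settings_by_base_lang := by
  intro data _
  unfold Spec_collect_settings_by_base_lang
  have hinit : targetLangs.foldl (fun g lang => g.insert lang PySem.Dict.empty)
      (PySem.Dict.empty : PySem.Dict String (PySem.Dict String (List (List (String × String)))))
      = PySem.Dict.mk [("en-ru", PySem.Dict.empty), ("en-nl", PySem.Dict.empty), ("en-zh", PySem.Dict.empty)] := by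
    decide
  simp only [collect_settings_by_base_lang, hinit, fold_inv]
  simp [collect_settings_by_base_lang_alt, pvGroups, targetLangs]
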